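-- pv_equiv track=rewrite | github.com/H0tP0cket/StackTrack | main.py | optimize_payouts
-- ===== SOURCE A (Python) =====
-- def optimize_payouts(playerNet):
--
--     creditors = [(player, net) for player, net in playerNet.items() if net > 0]
--     debtors = [(player, net) for player, net in playerNet.items() if net < 0]
--
--     creditors.sort(key=lambda x: x[1], reverse=True)
--     debtors.sort(key=lambda x: x[1])
--
--     payouts = {}
--
--     while creditors and debtors:
--         creditor, credit = creditors.pop(0)
--         debtor, debt = debtors.pop(0)
--
--         transaction_amount = min(credit, -debt)
--
--         if creditor not in payouts:
--             payouts[creditor] = {}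
--         payouts[creditor][debtor] = transaction_amount
--
--         credit -= transaction_amount
--         debt += transaction_amount
--
--         if credit > 0:
--             creditors.insert(0, (creditor, credit))
--         if debt < 0:
--             debtors.insert(0, (debtor, debt))
--
--     return payouts
-- ===== SOURCE B (Python) =====
-- def optimize_payouts(playerNet):
--     creditors = sorted(((p, n) for p, n in playerNet.items() if n > 0),
--                        key=lambda x: x[1], reverse=True)
--     debtors = sorted(((p, n) for p, n in playerNet.items() if n < 0),
--                      key=lambda x: x[1])
--
--     payouts = {}
--     i = j = 0
--     credit = creditors[0][1] if creditors else 0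
--     debt = debtors[0][1] if debtors else 0
--
--     while i < len(creditors) and j < len(debtors):
--         amt = min(credit, -debt)
--         payouts.setdefault(creditors[i][0], {})[debtors[j][0]] = amt
--         credit -= amt
--         debt += amt
--         if credit == 0:
--             i += 1
--             if i < len(creditors):
--                 credit = creditors[i][1]
--         if debt == 0:
--             j += 1
--             if j < len(debtors):
--                 debt = debtors[j][1]
--     return payouts
-- ===== Notes on version B (the rewrite author's own statement) =====
-- stated objective: alternative
-- what changed: Replaces A's queue mutation (pop(0)/insert(0) of partially-settled parties back into the lists) by a two-pointer walk over the two sorted lists, carrying the remaining credit/debt in local variables, so the lists are never rebuilt.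
import Mathlib
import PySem

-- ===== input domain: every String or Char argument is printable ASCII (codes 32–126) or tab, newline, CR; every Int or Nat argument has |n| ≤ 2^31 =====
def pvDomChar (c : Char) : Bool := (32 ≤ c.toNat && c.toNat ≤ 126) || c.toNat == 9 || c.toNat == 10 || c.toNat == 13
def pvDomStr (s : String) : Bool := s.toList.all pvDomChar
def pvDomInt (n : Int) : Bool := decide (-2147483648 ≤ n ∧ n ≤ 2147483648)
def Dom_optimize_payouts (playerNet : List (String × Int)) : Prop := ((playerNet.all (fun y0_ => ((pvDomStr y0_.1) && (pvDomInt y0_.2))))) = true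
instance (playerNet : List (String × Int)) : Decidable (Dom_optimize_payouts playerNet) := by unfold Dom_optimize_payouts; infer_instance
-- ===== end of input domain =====

-- B replaces A's pop(0)/insert(0) queue mutation by a two-pointer walk over the same two
-- sorted lists (objective: alternative; the RETURN value is what is compared — neither
-- version mutates its argument).

-- ===== PORT A =====
-- A's while loop: pop the front creditor and debtor, settle min(credit, -debt), re-insert
-- the party with a remainder at the front.  ports `payouts[creditor] = {}` / `payouts[creditor][debtor] = amt`
def optimize_payouts_loop (creditors debtors : List (String × Int))
    (payouts : PySem.Dict String (PySem.Dict String Int)) :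
    PySem.Dict String (PySem.Dict String Int) :=
  match creditors, debtors with
  | (creditor, credit) :: cs, (debtor, debt) :: ds =>
    let amt := min credit (-debt)
    let payouts1 := if payouts.contains creditor then payouts
                    else payouts.insert creditor PySem.Dict.empty
    let payouts2 := payouts1.modify creditor PySem.Dict.empty (fun inner => inner.insert debtor amt)
    let credit' := credit - amt
    let debt' := debt + amt
    let creditors' := if credit' > 0 then (creditor, credit') :: cs else cs
    let debtors' := if debt' < 0 then (debtor, debt') :: ds else ds
    optimize_payouts_loop creditors' debtors' payouts2
  | _, _ => payouts
termination_by creditors.length + debtors.length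
decreasing_by
  rcases min_choice credit (-debt) with h | h <;> split_ifs <;> simp <;> omega

def optimize_payouts (playerNet : List (String × Int)) : List (String × List (String × Int)) :=
  let creditors := PySem.List.sorted (playerNet.filter (fun p => decide (p.2 > 0))) (fun x => x.2) true
  let debtors := PySem.List.sorted (playerNet.filter (fun p => decide (p.2 < 0))) (fun x => x.2) false
  (optimize_payouts_loop creditors debtors PySem.Dict.empty).items.map (fun p => (p.1, p.2.items))

-- ===== PORT B =====
-- `creditors[i][1] if creditors else 0` and the re-seeding on pointer advance
def pvHeadVal (l : List (String × Int)) : Int :=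
  match l with
  | (_, v) :: _ => v
  | [] => 0

-- B's while loop: the two pointers are the suffixes `cs`, `ds` of the sorted lists; the
-- remaining amounts are carried in `credit` / `debt` and re-seeded when a pointer advances.
def optimize_payouts_alt_loop (cs : List (String × Int)) (credit : Int)
    (ds : List (String × Int)) (debt : Int)
    (payouts : PySem.Dict String (PySem.Dict String Int)) :
    PySem.Dict String (PySem.Dict String Int) :=
  match cs, ds with
  | (creditor, cv) :: cs', (debtor, dv) :: ds' =>
    let amt := min credit (-debt)
    -- payouts.setdefault(creditors[i][0], {})[debtors[j][0]] = amt
    let payouts' := payouts.modify creditor PySem.Dict.empty (fun inner => inner.insert debtor amt)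
    let credit' := credit - amt
    let debt' := debt + amt
    if credit' = 0 then
      if debt' = 0 then
        optimize_payouts_alt_loop cs' (pvHeadVal cs') ds' (pvHeadVal ds') payouts'
      else
        optimize_payouts_alt_loop cs' (pvHeadVal cs') ((debtor, dv) :: ds') debt' payouts'
    else
      -- here debt' = 0 (amt = min credit (-debt) zeroes one side; Python re-tests the guard)
      optimize_payouts_alt_loop ((creditor, cv) :: cs') credit' ds' (pvHeadVal ds') payouts'
  | _, _ => payouts
termination_by cs.length + ds.length
decreasing_by all_goals simp <;> omega

def optimize_payouts_alt (playerNet : List (String × Int)) : List (String × List (String × Int)) :=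
  let creditors := PySem.List.sorted (playerNet.filter (fun p => decide (p.2 > 0))) (fun x => x.2) true
  let debtors := PySem.List.sorted (playerNet.filter (fun p => decide (p.2 < 0))) (fun x => x.2) false
  (optimize_payouts_alt_loop creditors (pvHeadVal creditors) debtors (pvHeadVal debtors)
      PySem.Dict.empty).items.map (fun p => (p.1, p.2.items))

-- ===== PRECONDITION & SPEC =====
def Spec_optimize_payouts (playerNet : List (String × Int)) (out : List (String × List (String × Int))) : Prop := out = optimize_payouts_alt playerNet
instance (playerNet : List (String × Int)) (out : List (String × List (String × Int))) : Decidable (Spec_optimize_payouts playerNet out) := by unfold Spec_optimize_payouts; infer_instance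

-- ===== CLAIM (what is proved, stated in full; the proofs are below) =====
def Claim_equal_optimize_payouts : Prop := ∀ (playerNet : List (String × Int)), Dom_optimize_payouts playerNet → Spec_optimize_payouts playerNet (optimize_payouts playerNet)

-- ===== LEMMAS AND PROOFS =====

-- A's loop state is B's state with the carried remainder written back onto the head
def pvReplHead : List (String × Int) → Int → List (String × Int)
  | [], _ => []
  | (n, _) :: t, v => (n, v) :: t

theorem pvReplHead_headVal (l : List (String × Int)) : pvReplHead l (pvHeadVal l) = l := by
  rcases l with _ | ⟨⟨n, v⟩, t⟩ <;> rfl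

-- A's two-step `if creditor not in payouts: payouts[creditor] = {}` + item assignment
-- equals B's one-step setdefault/modify
theorem pv_update_eq {κ ν : Type} [BEq κ] [LawfulBEq κ] (d : PySem.Dict κ ν) (k : κ) (e : ν) (f : ν → ν) :
  (if d.contains k then d else d.insert k e).modify k e f = d.modify k e f := by
  simp only [PySem.Dict.modify]
  by_cases h : d.contains k = true
  · simp [h]
  · have hf : d.contains k = false := by simp at h; simp [h]
    simp only [hf, Bool.false_eq_true, ite_false]
    rw [PySem.Dict.getD_of_not_contains _ _ hf, PySem.Dict.getD_insert_self]
    apply PySem.Dict.ext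
    rw [PySem.Dict.items_insert_of_contains _ _ (PySem.Dict.contains_insert_self d k e)]
    rw [PySem.Dict.items_insert_of_not_contains _ _ hf,
        PySem.Dict.items_insert_of_not_contains _ _ hf]
    rw [List.map_append]
    have hne : ∀ p ∈ d.items, (p.1 == k) = false := by
      intro p hp
      apply beq_eq_false_iff_ne.2
      intro hk
      exact absurd ((PySem.Dict.contains_iff_mem_keys d k).2
        (hk ▸ PySem.Dict.mem_keys_of_mem_items d hp)) (by simp [hf])
    congr 1
    · rw [List.map_congr_left (fun p hp => by simp [hne p hp] :
        ∀ p ∈ d.items, (fun p => if (p.1 == k) = true then (k, f e) else p) p = id p)]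
      simp
    · simp

theorem pv_loop_eq (cs : List (String × Int)) (credit : Int) (ds : List (String × Int)) (debt : Int)
    (p : PySem.Dict String (PySem.Dict String Int)) :
    optimize_payouts_loop (pvReplHead cs credit) (pvReplHead ds debt) p
      = optimize_payouts_alt_loop cs credit ds debt p := by
  induction cs, credit, ds, debt, p using optimize_payouts_alt_loop.induct with
  | case1 credit debt payouts creditor cv cs' debtor dv ds' amt payouts' credit' debt' h1 h2 ih =>
      rw [pvReplHead_headVal, pvReplHead_headVal] at ih
      simp only [pvReplHead]
      rw [optimize_payouts_loop]
      simp only [pv_update_eq]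
      rw [if_neg (by omega : ¬ credit - min credit (-debt) > 0),
          if_neg (by omega : ¬ debt + min credit (-debt) < 0)]
      have h1' : credit - min credit (-debt) = 0 := h1
      have h2' : debt + min credit (-debt) = 0 := h2
      simp only [optimize_payouts_alt_loop, if_pos h1', if_pos h2']
      exact ih
  | case2 credit debt payouts creditor cv cs' debtor dv ds' amt payouts' credit' debt' h1 h2 ih =>
      rw [pvReplHead_headVal] at ih
      have hd : debt + min credit (-debt) < 0 := by
        have := min_le_right credit (-debt); omega
      simp only [pvReplHead] at ih ⊢
      rw [optimize_payouts_loop]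
      simp only [pv_update_eq]
      rw [if_neg (by omega : ¬ credit - min credit (-debt) > 0), if_pos hd]
      have h1' : credit - min credit (-debt) = 0 := h1
      have h2' : ¬ debt + min credit (-debt) = 0 := h2
      simp only [optimize_payouts_alt_loop, if_pos h1', if_neg h2']
      exact ih
  | case3 credit debt payouts creditor cv cs' debtor dv ds' amt payouts' credit' h1 ih =>
      rw [pvReplHead_headVal] at ih
      have hz : debt + min credit (-debt) = 0 := by
        rcases min_choice credit (-debt) with h | h <;> omega
      have hc : credit - min credit (-debt) > 0 := by
        have := min_le_left credit (-debt); omega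
      simp only [pvReplHead] at ih ⊢
      rw [optimize_payouts_loop]
      simp only [pv_update_eq]
      rw [if_pos hc, if_neg (by omega : ¬ debt + min credit (-debt) < 0)]
      have h1' : ¬ credit - min credit (-debt) = 0 := h1
      simp only [optimize_payouts_alt_loop, if_neg h1']
      exact ih
  | case4 cs credit ds debt payouts h =>
      rcases cs with _ | ⟨⟨cn, cvv⟩, cs'⟩ <;> rcases ds with _ | ⟨⟨dn, dvv⟩, ds'⟩ <;>
        simp only [pvReplHead] <;>
        first
        | rfl
        | (exact (by exact (h _ _ _ _ _ _ rfl rfl).elim))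
        | simp [optimize_payouts_loop, optimize_payouts_alt_loop]

-- ===== VERDICT (by name: the statement is the Claim_ definition above) =====
theorem optimize_payouts_spec : Claim_equal_optimize_payouts := by
  intro playerNet _
  unfold Spec_optimize_payouts optimize_payouts optimize_payouts_alt
  simp only []
  rw [← pv_loop_eq, pvReplHead_headVal, pvReplHead_headVal]
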